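-- pv_equiv track=rewrite | github.com/AndreiZherder/leetcode | 3143-maximum-points-inside-the-square.py | maxPointsInsideSquare
-- ===== SOURCE A (Python) =====
-- from typing import List
--
-- def maxPointsInsideSquare(points: List[List[int]], s: str) -> int:
--     n = len(points)
--     order = sorted(range(n), key=lambda i: max(abs(points[i][0]), abs(points[i][1])))
--     seen = set()
--     ans = 0
--     prev = -1
--     cnt = 0
--     for i in order:
--         cur = max(abs(points[i][0]), abs(points[i][1]))
--         if cur != prev:
--             ans += cnt
--             cnt = 0
--             prev = cur
--         if s[i] in seen:
--             return ans
--         else: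
--             seen.add(s[i])
--             cnt += 1
--     ans += cnt
--     return ans
-- ===== SOURCE B (Python) =====
-- def maxPointsInsideSquare(points, s):
--     first = {}
--     t = None
--     for p, c in zip(points, s):
--         d = max(abs(p[0]), abs(p[1]))
--         if c in first:
--             f = first[c]
--             lo = d if d < f else f
--             hi = f if d < f else d
--             first[c] = lo
--             if t is None or hi < t:
--                 t = hi
--         else:
--             first[c] = d
--     if t is None:
--         return len(points)
--     return sum(1 for p in points if max(abs(p[0]), abs(p[1])) < t)
-- ===== Notes on version B (the rewrite author's own statement) =====
-- stated objective: alternative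
-- what changed: Replaces A's sort-indices-by-Chebyshev-distance-and-scan-groups-until-a-label-repeats with a single unsorted pass that keeps, per label, the two smallest distances and then counts points strictly below the least second distance.
-- outside the precondition, e.g. on maxPointsInsideSquare([[0, 0], [0, 0], [5, 5]], 'aa'): A returns 0, B returns 0
import Mathlib
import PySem

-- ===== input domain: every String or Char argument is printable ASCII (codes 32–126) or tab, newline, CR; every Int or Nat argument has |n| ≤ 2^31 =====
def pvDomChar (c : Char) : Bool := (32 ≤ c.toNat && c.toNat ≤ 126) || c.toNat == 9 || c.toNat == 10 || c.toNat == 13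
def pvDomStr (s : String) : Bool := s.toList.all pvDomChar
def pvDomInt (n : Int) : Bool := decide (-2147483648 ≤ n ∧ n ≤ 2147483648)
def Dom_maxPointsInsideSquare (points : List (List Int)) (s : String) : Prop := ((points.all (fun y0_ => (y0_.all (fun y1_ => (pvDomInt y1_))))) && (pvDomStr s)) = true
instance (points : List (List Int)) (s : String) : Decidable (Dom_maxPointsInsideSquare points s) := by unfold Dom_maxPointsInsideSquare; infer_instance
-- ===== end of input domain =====

-- B replaces A's sort-and-scan with a single unsorted pass that keeps, per label, the two
-- smallest Chebyshev distances and then counts points strictly below the least second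
-- distance (objective: alternative).

-- ===== PORT A =====
-- the key A's sorted() and A's loop both compute: max(abs(points[i][0]), abs(points[i][1]))
def pvKeyA (points : List (List Int)) (i : Int) : Int :=
  let p := (PySem.List.pyGet? points i).getD []
  max |(PySem.List.pyGet? p 0).getD 0| |(PySem.List.pyGet? p 1).getD 0|

-- A's for-loop over the sorted index list (early return on a repeated label)
def pvScanA (points : List (List Int)) (s : String) :
    List Int → PySem.Set Char → Int → Int → Int → Int
  | [], _, ans, _, cnt => ans + cnt
  | i :: rest, seen, ans, prev, cnt =>
    let cur := pvKeyA points i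
    let ans' := if cur ≠ prev then ans + cnt else ans
    let cnt' := if cur ≠ prev then 0 else cnt
    let prev' := if cur ≠ prev then cur else prev
    let ch := (PySem.Str.pyGet? s i).getD ' '
    if PySem.Set.contains seen ch then ans'
    else pvScanA points s rest (PySem.Set.add seen ch) ans' prev' (cnt' + 1)

def maxPointsInsideSquare (points : List (List Int)) (s : String) : Int :=
  let n : Int := points.length
  let order := PySem.List.sorted (PySem.List.pyRange 0 n 1) (fun i => pvKeyA points i) false
  pvScanA points s order PySem.Set.empty 0 (-1) 0

-- ===== PORT B =====
def pvDOf (p : List Int) : Int :=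
  max |(PySem.List.pyGet? p 0).getD 0| |(PySem.List.pyGet? p 1).getD 0|

-- one step of B's single pass: per-label minimum distance plus running least second distance
def pvStepB (st : PySem.Dict Char Int × Option Int) (pc : List Int × Char) :
    PySem.Dict Char Int × Option Int :=
  let d := pvDOf pc.1
  let c := pc.2
  match st.1.get? c with
  | some f =>
    let lo := if d < f then d else f
    let hi := if d < f then f else d
    (st.1.insert c lo,
      match st.2 with
      | none => some hi
      | some tv => if hi < tv then some hi else some tv)
  | none => (st.1.insert c d, st.2)

def maxPointsInsideSquare_alt (points : List (List Int)) (s : String) : Int :=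
  let st := (points.zip s.toList).foldl pvStepB (PySem.Dict.empty, none)
  match st.2 with
  | none => (points.length : Int)
  | some tv => ((points.countP (fun p => decide (pvDOf p < tv))) : Int)

-- ===== PRECONDITION & SPEC =====
-- Pre_ excludes inputs where A raises IndexError: a point with fewer than 2 coordinates,
-- or len(s) < len(points) (A indexes s[i] for every point; on the few such inputs where a
-- repeated label makes A return before the bad index, B happens to return the same value).
def Pre_maxPointsInsideSquare (points : List (List Int)) (s : String) : Prop :=
  points.length ≤ s.toList.length ∧ ∀ p ∈ points, 2 ≤ p.length
instance (points : List (List Int)) (s : String) : Decidable (Pre_maxPointsInsideSquare points s) := by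
  unfold Pre_maxPointsInsideSquare; infer_instance

def pvWitness_maxPointsInsideSquare : List (List Int) × String := ([[0, 0], [1, 2]], "ab")

def Spec_maxPointsInsideSquare (points : List (List Int)) (s : String) (out : Int) : Prop := out = maxPointsInsideSquare_alt points s
instance (points : List (List Int)) (s : String) (out : Int) : Decidable (Spec_maxPointsInsideSquare points s out) := by unfold Spec_maxPointsInsideSquare; infer_instance

-- ===== CLAIM (what is proved, stated in full; the proofs are below) =====
def Claim_equal_maxPointsInsideSquare : Prop := ∀ (points : List (List Int)) (s : String), Dom_maxPointsInsideSquare points s → Pre_maxPointsInsideSquare points s → Spec_maxPointsInsideSquare points s (maxPointsInsideSquare points s)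

-- ===== LEMMAS AND PROOFS =====

-- minimum (in WithTop Int) of f over a list of (distance, label) pairs
def pvInf (f : Int × Char → WithTop Int) : List (Int × Char) → WithTop Int
  | [] => ⊤
  | q :: l => min (f q) (pvInf f l)

lemma pvLe_pvInf (f : Int × Char → WithTop Int) (a : WithTop Int) :
    ∀ l : List (Int × Char), (∀ q ∈ l, a ≤ f q) → a ≤ pvInf f l := by
  intro l
  induction l with
  | nil => intro _; simp [pvInf]
  | cons q t ih =>
    intro h
    simp only [pvInf, le_min_iff]
    exact ⟨h q (by simp), ih fun r hr => h r (by simp [hr])⟩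

lemma pvInf_congr (f g : Int × Char → WithTop Int) :
    ∀ l : List (Int × Char), (∀ q ∈ l, f q = g q) → pvInf f l = pvInf g l := by
  intro l
  induction l with
  | nil => intro _; rfl
  | cons q t ih =>
    intro h
    simp only [pvInf, h q (by simp), ih fun r hr => h r (by simp [hr])]

lemma pvInf_const_top : ∀ l : List (Int × Char), pvInf (fun _ => (⊤ : WithTop Int)) l = ⊤ := by
  intro l; induction l with
  | nil => rfl
  | cons q t ih => simp [pvInf, ih]

lemma pvInf_min (f g : Int × Char → WithTop Int) :
    ∀ l : List (Int × Char), pvInf (fun q => min (f q) (g q)) l = min (pvInf f l) (pvInf g l) := by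
  intro l; induction l with
  | nil => simp [pvInf]
  | cons q t ih =>
    simp only [pvInf, ih]
    rw [min_min_min_comm]

lemma pvMax_pvInf (a : WithTop Int) (f : Int × Char → WithTop Int) :
    ∀ l : List (Int × Char), max a (pvInf f l) = pvInf (fun q => max a (f q)) l := by
  intro l; induction l with
  | nil => simp [pvInf]
  | cons q t ih => simp only [pvInf, max_min_distrib_left, ih]

lemma pvInf_perm (f : Int × Char → WithTop Int) {l l' : List (Int × Char)} (h : l.Perm l') :
    pvInf f l = pvInf f l' := by
  induction h with
  | nil => rfl
  | cons x _ ih => simp [pvInf, ih]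
  | swap x y l => simp [pvInf, min_left_comm]
  | trans _ _ ih1 ih2 => exact ih1.trans ih2

-- least distance among pairs labelled c
def pvMlo (c : Char) (l : List (Int × Char)) : WithTop Int :=
  pvInf (fun q => if q.2 = c then (q.1 : WithTop Int) else ⊤) l

-- least, over unordered pairs with equal labels, of the larger of the two distances
def pvM : List (Int × Char) → WithTop Int
  | [] => ⊤
  | q :: l => min (max (q.1 : WithTop Int) (pvMlo q.2 l)) (pvM l)

lemma pvLe_pvMlo (d : Int) (c : Char) (l : List (Int × Char)) (h : ∀ q ∈ l, d ≤ q.1) :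
    (d : WithTop Int) ≤ pvMlo c l := by
  apply pvLe_pvInf
  intro q hq
  by_cases hc : q.2 = c <;> simp [hc, h q hq]

lemma pvLe_pvM (d : Int) : ∀ l : List (Int × Char), (∀ q ∈ l, d ≤ q.1) → (d : WithTop Int) ≤ pvM l := by
  intro l
  induction l with
  | nil => intro _; simp [pvM]
  | cons q t ih =>
    intro h
    simp only [pvM, le_min_iff]
    constructor
    · exact le_max_of_le_left (by exact_mod_cast h q (by simp))
    · exact ih fun r hr => h r (by simp [hr])

lemma pvM_perm : ∀ {l l' : List (Int × Char)}, l.Perm l' → pvM l = pvM l' := by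
  intro l l' h
  induction h with
  | nil => rfl
  | cons x h ih =>
    simp only [pvM, pvMlo]
    rw [pvInf_perm _ h, ih]
  | swap x y l =>
    simp only [pvM, pvMlo, pvInf]
    by_cases hxy : x.2 = y.2
    · simp only [hxy, ite_true]
      simp only [max_min_distrib_left]
      rw [max_comm (y.1 : WithTop Int) (x.1 : WithTop Int)]
      rw [min_assoc, min_assoc]
      rw [min_left_comm (max (y.1 : WithTop Int) (pvInf (fun q => if q.2 = y.2 then (q.1 : WithTop Int) else ⊤) l))]
    · rw [if_neg hxy, if_neg (fun h => hxy h.symm)]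
      simp only [le_top, min_eq_right]
      rw [min_left_comm]
  | trans _ _ ih1 ih2 => exact ih1.trans ih2

-- least distance among pairs whose label is already in seen
def pvHit (seen : List Char) (l : List (Int × Char)) : WithTop Int :=
  pvInf (fun q => if q.2 ∈ seen then (q.1 : WithTop Int) else ⊤) l

def pvT (seen : List Char) (l : List (Int × Char)) : WithTop Int := min (pvM l) (pvHit seen l)

-- A's loop on (distance, label) pairs
def pvScanP : List (Int × Char) → PySem.Set Char → Int → Int → Int → Int
  | [], _, ans, _, cnt => ans + cnt
  | (d, c) :: rest, seen, ans, prev, cnt =>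
    let ans' := if d ≠ prev then ans + cnt else ans
    let cnt' := if d ≠ prev then 0 else cnt
    let prev' := if d ≠ prev then d else prev
    if PySem.Set.contains seen c then ans'
    else pvScanP rest (PySem.Set.add seen c) ans' prev' (cnt' + 1)

lemma pvScanA_eq_scanP (points : List (List Int)) (s : String) :
    ∀ (l : List Int) (seen : PySem.Set Char) (ans prev cnt : Int),
      pvScanA points s l seen ans prev cnt =
        pvScanP (l.map (fun i => (pvKeyA points i, (PySem.Str.pyGet? s i).getD ' ')))
          seen ans prev cnt := by
  intro l
  induction l with
  | nil => intro seen ans prev cnt; rfl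
  | cons i rest ih =>
    intro seen ans prev cnt
    simp only [pvScanA, pvScanP, List.map_cons]
    split
    · rfl
    · exact ih _ _ _ _

lemma pvScanP_spec :
    ∀ (l : List (Int × Char)) (seen : PySem.Set Char) (ans prev cnt : Int),
      l.Pairwise (fun p q => p.1 ≤ q.1) → (∀ q ∈ l, prev ≤ q.1) →
      pvScanP l seen ans prev cnt =
        ans + (if (prev : WithTop Int) < pvT seen l then cnt else 0)
            + (l.countP (fun q => decide ((q.1 : WithTop Int) < pvT seen l)) : Int) := by
  intro l
  induction l with
  | nil =>
    intro seen ans prev cnt _ _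
    simp [pvScanP, pvT, pvM, pvHit, pvInf]
  | cons q rest ih =>
    obtain ⟨d, c⟩ := q
    intro seen ans prev cnt hp hb
    have hd : ∀ r ∈ rest, d ≤ r.1 := fun r hr => (List.pairwise_cons.mp hp).1 r hr
    have hp' : rest.Pairwise (fun p q => p.1 ≤ q.1) := (List.pairwise_cons.mp hp).2
    have hprevd : prev ≤ d := hb (d, c) (by simp)
    have F1 : (d : WithTop Int) ≤ pvMlo c rest := pvLe_pvMlo d c rest hd
    have F2 : (d : WithTop Int) ≤ pvM rest := pvLe_pvM d rest hd
    have F3 : (d : WithTop Int) ≤ pvHit seen rest := by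
      apply pvLe_pvInf; intro r hr
      by_cases h : r.2 ∈ seen <;> simp [h, hd r hr]
    by_cases hseen : c ∈ seen
    · -- a repeated label: A returns here, and the threshold is exactly d
      have hcontains : PySem.Set.contains seen c = true := (PySem.Set.contains_iff seen c).mpr hseen
      have hT : pvT seen ((d, c) :: rest) = (d : WithTop Int) := by
        apply le_antisymm
        · calc pvT seen ((d, c) :: rest) ≤ pvHit seen ((d, c) :: rest) := min_le_right _ _
            _ ≤ (d : WithTop Int) := by
              simp only [pvHit, pvInf]
              exact le_trans (min_le_left _ _) (by simp [hseen])
        · simp only [pvT, pvM, pvHit, pvInf, le_min_iff]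
          exact ⟨⟨le_max_left _ _, F2⟩, ⟨by simp [hseen], F3⟩⟩
      have hcount : ((d, c) :: rest).countP
          (fun q => decide ((q.1 : WithTop Int) < pvT seen ((d, c) :: rest))) = 0 := by
        rw [hT]
        apply List.countP_eq_zero.mpr
        intro r hr
        rcases List.mem_cons.mp hr with h | h
        · rw [h]; simp
        · simp only [decide_eq_true_eq, not_lt, WithTop.coe_le_coe]
          exact_mod_cast hd r h
      rw [hcount, hT]
      simp only [pvScanP, hcontains, if_true]
      by_cases hdp : d = prev
      · subst hdp
        simp
      · have hlt : prev < d := lt_of_le_of_ne hprevd (fun h => hdp h.symm)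
        have : ((prev : WithTop Int)) < (d : WithTop Int) := by exact_mod_cast hlt
        simp [hdp, this]
    · -- a fresh label: recurse with the label added to seen
      have hcontains : PySem.Set.contains seen c = false :=
        Bool.eq_false_iff.mpr (fun h => hseen ((PySem.Set.contains_iff seen c).mp h))
      have hadd : PySem.Set.add seen c = seen ++ [c] := by
        simp [PySem.Set.add, hseen]
      have hhit : pvHit (seen ++ [c]) rest = min (pvHit seen rest) (pvMlo c rest) := by
        rw [pvHit, pvHit, pvMlo, ← pvInf_min]
        apply pvInf_congr
        intro r _
        by_cases h1 : r.2 ∈ seen <;> by_cases h2 : r.2 = c <;> simp [h1, h2, hseen]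
      have hT2 : pvT (PySem.Set.add seen c) rest = pvT seen ((d, c) :: rest) := by
        rw [hadd, pvT, hhit]
        have : pvT seen ((d, c) :: rest)
            = min (min (pvMlo c rest) (pvM rest)) (pvHit seen rest) := by
          simp only [pvT, pvM, pvHit, pvInf, if_neg hseen]
          rw [max_eq_right F1]
          congr 1
          exact min_eq_right le_top
        rw [this, min_comm (pvMlo c rest) (pvM rest), min_assoc,
          min_comm (pvHit seen rest) (pvMlo c rest)]
      have hstep : pvScanP ((d, c) :: rest) seen ans prev cnt
          = pvScanP rest (PySem.Set.add seen c)
              (if d ≠ prev then ans + cnt else ans) d ((if d ≠ prev then 0 else cnt) + 1) := by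
        simp only [pvScanP, hcontains, Bool.false_eq_true, if_false]
        by_cases hdp : d = prev
        · simp [hdp]
        · simp [hdp]
      rw [hstep, ih _ _ _ _ hp' hd, hT2]
      set T := pvT seen ((d, c) :: rest) with hTdef
      have hdT : (d : WithTop Int) ≤ T := by
        rw [hTdef]
        simp only [pvT, pvM, pvHit, pvInf, le_min_iff]
        exact ⟨⟨le_max_left _ _, F2⟩, ⟨by simp [hseen], F3⟩⟩
      rw [List.countP_cons]
      by_cases hdp : d = prev
      · subst hdp
        by_cases hc : ((d : WithTop Int)) < T
        · simp [hc]; omega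
        · simp [hc]
      · have hlt : prev < d := lt_of_le_of_ne hprevd (fun h => hdp h.symm)
        have hprevT : ((prev : WithTop Int)) < T :=
          lt_of_lt_of_le (by exact_mod_cast hlt) hdT
        by_cases hc : ((d : WithTop Int)) < T
        · simp [hdp, hc, hprevT]; omega
        · simp [hdp, hc, hprevT]

-- ----- B side -----
def pvTop : Option Int → WithTop Int
  | none => ⊤
  | some v => (v : WithTop Int)

def pvCross (first : PySem.Dict Char Int) (l : List (Int × Char)) : WithTop Int :=
  pvInf (fun q => max (q.1 : WithTop Int) (pvTop (first.get? q.2))) l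

-- contribution of label c, with w as the dict's entry for c
def pvInfC (c : Char) (w : WithTop Int) (R : List (Int × Char)) : WithTop Int :=
  pvInf (fun q => if q.2 = c then max (q.1 : WithTop Int) w else ⊤) R

-- pvCross restricted to labels other than c
def pvRem (first : PySem.Dict Char Int) (c : Char) (R : List (Int × Char)) : WithTop Int :=
  pvInf (fun q => if q.2 = c then ⊤ else max (q.1 : WithTop Int) (pvTop (first.get? q.2))) R

lemma pvInfC_split (c : Char) (w₁ w₂ : WithTop Int) (R : List (Int × Char)) :
    pvInfC c (min w₁ w₂) R = min (pvInfC c w₁ R) (pvInfC c w₂ R) := by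
  rw [pvInfC, pvInfC, pvInfC, ← pvInf_min]
  apply pvInf_congr
  intro r _
  by_cases h : r.2 = c <;> simp [h, max_min_distrib_left]

lemma pvInfC_top (c : Char) (R : List (Int × Char)) : pvInfC c ⊤ R = ⊤ := by
  rw [pvInfC]
  calc pvInf (fun q => if q.2 = c then max (q.1 : WithTop Int) ⊤ else ⊤) R
      = pvInf (fun _ => ⊤) R := by
        apply pvInf_congr; intro r _; by_cases h : r.2 = c <;> simp [h]
    _ = ⊤ := pvInf_const_top R

lemma pvMax_pvMlo (c : Char) (w : WithTop Int) (R : List (Int × Char)) :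
    max w (pvMlo c R) = pvInfC c w R := by
  rw [pvMlo, pvMax_pvInf, pvInfC]
  apply pvInf_congr
  intro r _
  by_cases h : r.2 = c <;> simp [h, max_comm]

lemma pvCross_insert (first : PySem.Dict Char Int) (c : Char) (v : Int)
    (R : List (Int × Char)) :
    pvCross (first.insert c v) R = min (pvInfC c (v : WithTop Int) R) (pvRem first c R) := by
  rw [pvCross, pvRem, pvInfC, ← pvInf_min]
  apply pvInf_congr
  intro r _
  by_cases h : r.2 = c
  · rw [h]
    simp [PySem.Dict.get?_insert_self, pvTop]
  · simp [h, PySem.Dict.get?_insert_of_ne first v h]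

lemma pvCross_decomp (first : PySem.Dict Char Int) (c : Char) (R : List (Int × Char)) :
    pvCross first R = min (pvInfC c (pvTop (first.get? c)) R) (pvRem first c R) := by
  rw [pvCross, pvRem, pvInfC, ← pvInf_min]
  apply pvInf_congr
  intro r _
  by_cases h : r.2 = c <;> simp [h]

lemma pvM_cons (q : Int × Char) (l : List (Int × Char)) :
    pvM (q :: l) = min (max (q.1 : WithTop Int) (pvMlo q.2 l)) (pvM l) := rfl

lemma pvCross_cons (first : PySem.Dict Char Int) (q : Int × Char) (l : List (Int × Char)) :
    pvCross first (q :: l) = min (max (q.1 : WithTop Int) (pvTop (first.get? q.2))) (pvCross first l) := rfl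

lemma pvFoldB :
    ∀ (L : List (List Int × Char)) (first : PySem.Dict Char Int) (t : Option Int),
      pvTop (L.foldl pvStepB (first, t)).2 =
        min (pvTop t)
          (min (pvM (L.map fun pc => (pvDOf pc.1, pc.2)))
               (pvCross first (L.map fun pc => (pvDOf pc.1, pc.2)))) := by
  intro L
  induction L with
  | nil =>
    intro first t
    simp [pvM, pvCross, pvInf, pvTop]
  | cons pc L' ih =>
    intro first t
    simp only [List.foldl_cons, List.map_cons]
    rcases hf : first.get? pc.2 with _ | f0
    · -- new label: dict gains it, threshold unchanged
      have hstep : pvStepB (first, t) pc = (first.insert pc.2 (pvDOf pc.1), t) := by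
        simp [pvStepB, hf]
      rw [hstep, ih, pvCross_insert, pvM_cons, pvCross_cons,
        pvCross_decomp first pc.2 (List.map (fun pc => (pvDOf pc.1, pc.2)) L'), hf]
      simp only
      rw [pvMax_pvMlo pc.2 ((pvDOf pc.1 : Int) : WithTop Int)]
      rw [show pvTop none = (⊤ : WithTop Int) from rfl, max_eq_right le_top, pvInfC_top,
        min_eq_right le_top, min_eq_right le_top]
      ac_rfl
    · -- seen label: dict entry drops to the min, threshold to the least second distance
      have hlo : ((if pvDOf pc.1 < f0 then pvDOf pc.1 else f0 : Int) : WithTop Int)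
          = min ((pvDOf pc.1 : Int) : WithTop Int) ((f0 : Int) : WithTop Int) := by
        rcases lt_or_ge (pvDOf pc.1) f0 with h | h
        · rw [if_pos h, min_eq_left (by exact_mod_cast h.le)]
        · rw [if_neg (not_lt.mpr h), min_eq_right (by exact_mod_cast h)]
      have hhi : ((if pvDOf pc.1 < f0 then f0 else pvDOf pc.1 : Int) : WithTop Int)
          = max ((pvDOf pc.1 : Int) : WithTop Int) ((f0 : Int) : WithTop Int) := by
        rcases lt_or_ge (pvDOf pc.1) f0 with h | h
        · rw [if_pos h, max_eq_right (by exact_mod_cast h.le)]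
        · rw [if_neg (not_lt.mpr h), max_eq_left (by exact_mod_cast h)]
      have hstep : pvStepB (first, t) pc =
          (first.insert pc.2 (if pvDOf pc.1 < f0 then pvDOf pc.1 else f0),
            some (min (if pvDOf pc.1 < f0 then f0 else pvDOf pc.1)
              (t.getD (if pvDOf pc.1 < f0 then f0 else pvDOf pc.1)))) := by
        cases t with
        | none => simp [pvStepB, hf]
        | some tv =>
          simp only [pvStepB, hf, Option.getD_some]
          rcases lt_or_ge (if pvDOf pc.1 < f0 then f0 else pvDOf pc.1) tv with h | h
          · simp [h, min_eq_left h.le]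
          · simp [not_lt.mpr h, min_eq_right h]
      have ht' : pvTop (some (min (if pvDOf pc.1 < f0 then f0 else pvDOf pc.1)
              (t.getD (if pvDOf pc.1 < f0 then f0 else pvDOf pc.1))))
          = min (max ((pvDOf pc.1 : Int) : WithTop Int) ((f0 : Int) : WithTop Int)) (pvTop t) := by
        cases t with
        | none =>
          simp only [Option.getD_none, min_self]
          rw [show pvTop (some (if pvDOf pc.1 < f0 then f0 else pvDOf pc.1))
            = ((if pvDOf pc.1 < f0 then f0 else pvDOf pc.1 : Int) : WithTop Int) from rfl, hhi]
          exact (min_eq_left le_top).symm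
        | some tv =>
          show ((min (if pvDOf pc.1 < f0 then f0 else pvDOf pc.1) tv : Int) : WithTop Int) = _
          rw [WithTop.coe_inf, hhi]
          rfl
      rw [hstep, ih, ht', pvCross_insert, hlo, pvInfC_split, pvM_cons, pvCross_cons,
        pvCross_decomp first pc.2 (List.map (fun pc => (pvDOf pc.1, pc.2)) L'), hf]
      simp only
      rw [pvMax_pvMlo pc.2 ((pvDOf pc.1 : Int) : WithTop Int)]
      rw [show pvTop (some f0) = ((f0 : Int) : WithTop Int) from rfl]
      rw [← pvMax_pvMlo pc.2 ((f0 : Int) : WithTop Int)]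
      ac_rfl

-- the sorted index list, mapped to (distance, label) pairs, is a permutation of B's pair list
lemma pvPairs_eq (points : List (List Int)) (s : String)
    (hpre : points.length ≤ s.toList.length) :
    (PySem.List.pyRange 0 (points.length : Int) 1).map
        (fun i => (pvKeyA points i, (PySem.Str.pyGet? s i).getD ' ')) =
      (points.zip s.toList).map (fun pc => (pvDOf pc.1, pc.2)) := by
  have hpre' : points.length ≤ s.length := by simpa using hpre
  apply List.ext_getElem
  · simp [PySem.List.length_pyRange_one, hpre']
  · intro k h1 h2
    have hk : k < points.length := by
      simpa [PySem.List.length_pyRange_one] using h1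
    have hks : k < s.toList.length := lt_of_lt_of_le hk hpre
    simp only [List.getElem_map, PySem.List.getElem_pyRange_one, List.getElem_zip, zero_add]
    simp [pvKeyA, pvDOf, PySem.List.pyGet?_natCast, hk]
    rw [List.getElem?_eq_getElem hks, Option.getD_some]

-- pvHit over an empty seen set, and pvCross over an empty dict, are ⊤
lemma pvHit_empty (l : List (Int × Char)) : pvHit PySem.Set.empty l = ⊤ := by
  rw [pvHit]
  calc pvInf (fun q => if q.2 ∈ PySem.Set.empty then (q.1 : WithTop Int) else ⊤) l
      = pvInf (fun _ => ⊤) l := by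
        apply pvInf_congr; intro r _; simp [PySem.Set.empty]
    _ = ⊤ := pvInf_const_top l

lemma pvCross_empty (l : List (Int × Char)) : pvCross PySem.Dict.empty l = ⊤ := by
  rw [pvCross]
  calc pvInf (fun q => max (q.1 : WithTop Int) (pvTop (PySem.Dict.empty.get? q.2))) l
      = pvInf (fun _ => ⊤) l := by
        apply pvInf_congr; intro r _
        rw [PySem.Dict.get?_empty]
        exact max_eq_right le_top
    _ = ⊤ := pvInf_const_top l

-- ===== VERDICT (by name: the statement is the Claim_ definition above) =====
theorem maxPointsInsideSquare_spec : Claim_equal_maxPointsInsideSquare := by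
  intro points s _hdom hpre
  obtain ⟨hlen, _hpts⟩ := hpre
  unfold Spec_maxPointsInsideSquare
  -- A's side: sorted scan = count below the least second distance
  rw [maxPointsInsideSquare]
  rw [pvScanA_eq_scanP]
  have hpw : ((PySem.List.sorted (PySem.List.pyRange 0 (points.length : Int) 1)
        (fun i => pvKeyA points i) false).map
        (fun i => (pvKeyA points i, (PySem.Str.pyGet? s i).getD ' '))).Pairwise
        (fun p q => p.1 ≤ q.1) := by
    exact List.Pairwise.map _ (fun a b h => h)
      (PySem.List.sorted_pairwise (PySem.List.pyRange 0 (points.length : Int) 1)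
        (fun i => pvKeyA points i))
  have hlb : ∀ q ∈ (PySem.List.sorted (PySem.List.pyRange 0 (points.length : Int) 1)
        (fun i => pvKeyA points i) false).map
        (fun i => (pvKeyA points i, (PySem.Str.pyGet? s i).getD ' ')), (-1 : Int) ≤ q.1 := by
    intro q hq
    obtain ⟨i, _, rfl⟩ := List.mem_map.mp hq
    have : (0 : Int) ≤ pvKeyA points i :=
      le_trans (abs_nonneg _) (le_max_left _ _)
    omega
  rw [pvScanP_spec _ _ _ _ _ hpw hlb]
  rw [pvT, pvHit_empty, min_eq_left le_top]
  simp only [ite_self, zero_add]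
  -- permute A's pair list into B's pair list
  have hperm : ((PySem.List.sorted (PySem.List.pyRange 0 (points.length : Int) 1)
        (fun i => pvKeyA points i) false).map
        (fun i => (pvKeyA points i, (PySem.Str.pyGet? s i).getD ' '))).Perm
      ((points.zip s.toList).map (fun pc => (pvDOf pc.1, pc.2))) := by
    have h1 := (PySem.List.sorted_perm (PySem.List.pyRange 0 (points.length : Int) 1)
      (fun i => pvKeyA points i) false).map
      (fun i => (pvKeyA points i, (PySem.Str.pyGet? s i).getD ' '))
    rwa [pvPairs_eq points s hlen] at h1
  rw [pvM_perm hperm, hperm.countP_eq]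
  -- B's side
  rw [maxPointsInsideSquare_alt]
  have hfold := pvFoldB (points.zip s.toList) PySem.Dict.empty none
  rw [pvCross_empty] at hfold
  rw [show pvTop none = (⊤ : WithTop Int) from rfl] at hfold
  rw [min_eq_right le_top, min_eq_left le_top] at hfold
  rcases hres : ((points.zip s.toList).foldl pvStepB (PySem.Dict.empty, none)).2 with _ | tv
  · -- no label repeats: everything counts
    rw [hres] at hfold
    rw [show pvTop none = (⊤ : WithTop Int) from rfl] at hfold
    rw [← hfold]
    rw [List.countP_eq_length.mpr (fun q _ => decide_eq_true (WithTop.coe_lt_top q.1))]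
    have hpre' : points.length ≤ s.length := by simpa using hlen
    simp [hpre']
  · rw [hres] at hfold
    rw [show pvTop (some tv) = ((tv : Int) : WithTop Int) from rfl] at hfold
    rw [← hfold]
    have hcnt : ((points.zip s.toList).map (fun pc => (pvDOf pc.1, pc.2))).countP
          (fun q => decide ((q.1 : WithTop Int) < ((tv : Int) : WithTop Int)))
        = points.countP (fun p => decide (pvDOf p < tv)) := by
      rw [List.countP_map]
      have : points = (points.zip s.toList).map Prod.fst :=
        (List.map_fst_zip hlen).symm
      conv_rhs => rw [this]
      rw [List.countP_map]
      apply List.countP_congr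
      intro pc _
      constructor <;> · intro h; simp only [decide_eq_true_eq, Function.comp] at *; exact_mod_cast h
    rw [hcnt]
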